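-- pv_equiv track=rewrite | github.com/Abdulaziz-04/leetcode-solutions | 0073-set-matrix-zeroes/0073-set-matrix-zeroes.py | setZeroes
-- ===== SOURCE A (Python) =====
-- from typing import List
--
-- def setZeroes(matrix: List[List[int]]) -> None:
--     """
--     Do not return anything, modify matrix in-place instead.
--     """
--     r=len(matrix)
--     c=len(matrix[0])
--     visited=set()
--     def dfs(i,j):
--         for k in range(c):
--             if matrix[i][k]!=0 and (i,k) not in visited:
--                 visited.add((i,k))
--         for k in range(r):
--             if matrix[k][j]!=0 and (k,j) not in visited:
--                 visited.add((k,j))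
--
--     for i in range(r):
--         for j in range(c):
--             if matrix[i][j]==0:
--                 dfs(i,j)
--     for i in range(r):
--         for j in range(c):
--             if (i,j) in visited:
--                 matrix[i][j]=0
--     return matrix
-- ===== SOURCE B (Python) =====
-- def setZeroes(matrix):
--     # One pass records which rows/columns contain a zero; a second pass
--     # zeroes every cell in a flagged row or column, in place.
--     r, c = len(matrix), len(matrix[0])
--     zero_rows = set()
--     zero_cols = set()
--     for i in range(r):
--         for j in range(c):
--             if matrix[i][j] == 0:
--                 zero_rows.add(i)
--                 zero_cols.add(j)
--     for i in range(r):
--         for j in range(c):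
--             if i in zero_rows or j in zero_cols:
--                 matrix[i][j] = 0
--     return matrix
-- ===== Notes on version B (the rewrite author's own statement) =====
-- stated objective: faster
-- what changed: A, at every zero cell, rescans that cell's whole row and column into a visited set of cells (O(r*c*(r+c))); B records which rows and columns contain a zero in one O(r*c) pass and rewrites each cell from those two flag sets; Pre_ excludes only the inputs on which A raises IndexError (empty matrix, or a row shorter than the first).
-- outside the precondition, e.g. on setZeroes([]): A raises IndexError, B raises IndexError
import Mathlib
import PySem

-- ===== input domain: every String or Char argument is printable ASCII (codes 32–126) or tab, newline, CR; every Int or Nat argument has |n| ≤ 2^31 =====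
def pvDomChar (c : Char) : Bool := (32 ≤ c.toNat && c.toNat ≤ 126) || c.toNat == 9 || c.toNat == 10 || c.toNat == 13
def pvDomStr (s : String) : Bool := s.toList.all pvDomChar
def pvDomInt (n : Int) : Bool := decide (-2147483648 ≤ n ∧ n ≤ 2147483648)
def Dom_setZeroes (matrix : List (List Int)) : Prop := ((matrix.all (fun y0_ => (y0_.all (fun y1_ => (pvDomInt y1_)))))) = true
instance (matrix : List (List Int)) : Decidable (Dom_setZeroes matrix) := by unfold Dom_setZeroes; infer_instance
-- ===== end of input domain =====

-- B replaces A's per-zero-cell row/column rescans into a visited set of cells by one pass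
-- recording zero rows/columns and a rewrite from those two flags (measured asymptotically faster).
-- Both Pythons mutate `matrix` in place and return it; the equivalence proved is about the return value.


-- ===== PORT A =====
-- matrix[i][k]: indices are always in range where it is read under Pre_ (rectangular matrix); getD is exact there
def pvGet (matrix : List (List Int)) (i k : Nat) : Int := (matrix.getD i []).getD k 0

-- the nested function dfs(i, j): scan row i, then column j, adding nonzero unvisited cells
def pvDfs (matrix : List (List Int)) (r c : Nat) (i j : Nat)
    (visited : PySem.Set (Nat × Nat)) : PySem.Set (Nat × Nat) :=
  (List.range r).foldl
    (fun v k => if pvGet matrix k j ≠ 0 ∧ (k, j) ∉ v then PySem.Set.add v (k, j) else v)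
    ((List.range c).foldl
      (fun v k => if pvGet matrix i k ≠ 0 ∧ (i, k) ∉ v then PySem.Set.add v (i, k) else v) visited)

-- first double loop: call dfs at every zero cell, accumulating `visited`
def pvVisited (matrix : List (List Int)) (r c : Nat) : PySem.Set (Nat × Nat) :=
  (List.range r).foldl
    (fun v i => (List.range c).foldl
      (fun v j => if pvGet matrix i j = 0 then pvDfs matrix r c i j v else v) v)
    PySem.Set.empty

def setZeroes (matrix : List (List Int)) : List (List Int) :=
  let r := matrix.length
  let c := (matrix.headD []).length   -- len(matrix[0]); raises on [] — excluded by Pre_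
  let visited := pvVisited matrix r c
  -- second double loop: matrix[i][j] = 0 for visited cells (List.set is exact: indices in range under Pre_)
  (List.range r).foldl
    (fun m i => (List.range c).foldl
      (fun m j => if (i, j) ∈ visited then m.set i ((m.getD i []).set j 0) else m) m)
    matrix

-- ===== PORT B =====
-- B's first pass: the pair of flag sets (zero_rows, zero_cols)
def pvFlags (matrix : List (List Int)) (r c : Nat) : PySem.Set Nat × PySem.Set Nat :=
  (List.range r).foldl
    (fun p i => (List.range c).foldl
      (fun p j => if pvGet matrix i j = 0 then (PySem.Set.add p.1 i, PySem.Set.add p.2 j) else p) p)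
    (PySem.Set.empty, PySem.Set.empty)

def setZeroes_alt (matrix : List (List Int)) : List (List Int) :=
  let r := matrix.length
  let c := (matrix.headD []).length   -- len(matrix[0]); raises on [] — excluded by Pre_
  let zz := pvFlags matrix r c
  -- B's second pass: matrix[i][j] = 0 for flagged rows/columns (in range under Pre_)
  (List.range r).foldl
    (fun m i => (List.range c).foldl
      (fun m j => if i ∈ zz.1 ∨ j ∈ zz.2 then m.set i ((m.getD i []).set j 0) else m) m)
    matrix

-- ===== PRECONDITION & SPEC =====
-- Pre_ excludes exactly the inputs on which A raises IndexError: the empty matrix ([] has no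
-- matrix[0]) and matrices with a row shorter than the first row (indexed past its end).
def Pre_setZeroes (matrix : List (List Int)) : Prop :=
  matrix ≠ [] ∧ ∀ row ∈ matrix, (matrix.headD []).length ≤ row.length
instance (matrix : List (List Int)) : Decidable (Pre_setZeroes matrix) := by
  unfold Pre_setZeroes; infer_instance

def pvWitness_setZeroes : List (List Int) := [[1, 0, 3], [4, 5, 6], [0, 8, 9]]

def Spec_setZeroes (matrix : List (List Int)) (out : List (List Int)) : Prop := out = setZeroes_alt matrix
instance (matrix : List (List Int)) (out : List (List Int)) : Decidable (Spec_setZeroes matrix out) := by unfold Spec_setZeroes; infer_instance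

-- ===== CLAIM (what is proved, stated in full; the proofs are below) =====
def Claim_equal_setZeroes : Prop := ∀ (matrix : List (List Int)), Dom_setZeroes matrix → Pre_setZeroes matrix → Spec_setZeroes matrix (setZeroes matrix)

-- ===== LEMMAS AND PROOFS =====

-- membership through one of dfs's guarded accumulation loops
theorem pv_mem_foldl_guard {α β : Type} [BEq α] [LawfulBEq α] (cond : β → Prop) [DecidablePred cond]
    (f : β → α) :
    ∀ (l : List β) (v : List α) (x : α),
      (x ∈ l.foldl (fun v q => if cond q ∧ f q ∉ v then PySem.Set.add v (f q) else v) v) ↔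
        x ∈ v ∨ ∃ q ∈ l, cond q ∧ x = f q := by
  intro l
  induction l with
  | nil => simp
  | cons q l ih =>
    intro v x
    simp only [List.foldl_cons, ih, List.mem_cons]
    by_cases hc : cond q
    · by_cases hm : f q ∈ v
      · simp only [hc, hm, not_true, and_false, if_false]
        constructor
        · rintro (h | h) <;> [left; skip] <;> try assumption
          right; obtain ⟨b, hb, h1, h2⟩ := h; exact ⟨b, Or.inr hb, h1, h2⟩
        · rintro (h | ⟨b, hb | hb, h1, h2⟩)
          · tauto
          · subst hb; subst h2; tauto
          · exact Or.inr ⟨b, hb, h1, h2⟩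
      · simp only [hc, hm, not_false_iff, and_true, if_true, PySem.Set.mem_add]
        constructor
        · rintro ((h | h) | h)
          · tauto
          · exact Or.inr ⟨q, Or.inl rfl, hc, h⟩
          · obtain ⟨b, hb, h1, h2⟩ := h; exact Or.inr ⟨b, Or.inr hb, h1, h2⟩
        · rintro (h | ⟨b, hb | hb, h1, h2⟩)
          · tauto
          · subst hb; tauto
          · exact Or.inr ⟨b, hb, h1, h2⟩
    · simp only [hc, false_and, if_false]
      constructor
      · rintro (h | ⟨b, hb, h1, h2⟩)
        · tauto
        · exact Or.inr ⟨b, Or.inr hb, h1, h2⟩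
      · rintro (h | ⟨b, hb | hb, h1, h2⟩)
        · tauto
        · subst hb; exact absurd h1 hc
        · exact Or.inr ⟨b, hb, h1, h2⟩


-- membership through a fold whose step adds a per-element set of members
theorem pv_mem_foldl_union {α β : Type} (step : β → List α → List α) (S : β → α → Prop)
    (hstep : ∀ q v x, x ∈ step q v ↔ x ∈ v ∨ S q x) :
    ∀ (l : List β) (v : List α) (x : α),
      x ∈ l.foldl (fun v q => step q v) v ↔ x ∈ v ∨ ∃ q ∈ l, S q x := by
  intro l
  induction l with
  | nil => simp
  | cons q l ih =>
    intro v x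
    simp only [List.foldl_cons, ih, hstep, List.mem_cons]
    constructor
    · rintro ((h | h) | ⟨b, hb, hSb⟩)
      · tauto
      · exact Or.inr ⟨q, Or.inl rfl, h⟩
      · exact Or.inr ⟨b, Or.inr hb, hSb⟩
    · rintro (h | ⟨b, hb | hb, hSb⟩)
      · tauto
      · subst hb; tauto
      · exact Or.inr ⟨b, hb, hSb⟩

theorem pv_mem_dfs (matrix : List (List Int)) (r c : Nat) (i j : Nat)
    (v : PySem.Set (Nat × Nat)) (x : Nat × Nat) :
    x ∈ pvDfs matrix r c i j v ↔ x ∈ v ∨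
      (∃ k < c, x = (i, k) ∧ pvGet matrix i k ≠ 0) ∨
      (∃ k < r, x = (k, j) ∧ pvGet matrix k j ≠ 0) := by
  unfold pvDfs
  simp only [pv_mem_foldl_guard]
  simp only [List.mem_range]
  constructor
  · rintro ((h | ⟨k, hk, h1, h2⟩) | ⟨k, hk, h1, h2⟩)
    · tauto
    · exact Or.inr (Or.inl ⟨k, hk, h2, h1⟩)
    · exact Or.inr (Or.inr ⟨k, hk, h2, h1⟩)
  · rintro (h | ⟨k, hk, h1, h2⟩ | ⟨k, hk, h1, h2⟩)
    · tauto
    · exact Or.inl (Or.inr ⟨k, hk, h2, h1⟩)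
    · exact Or.inr ⟨k, hk, h2, h1⟩

-- row i (resp. column j) contains a zero among its first c (resp. r) entries
def pvRowZ (matrix : List (List Int)) (c : Nat) (i : Nat) : Prop := ∃ j < c, pvGet matrix i j = 0
def pvColZ (matrix : List (List Int)) (r : Nat) (j : Nat) : Prop := ∃ i < r, pvGet matrix i j = 0

-- A's visited set: exactly the nonzero cells lying in a zero row or zero column
theorem pv_mem_visited (matrix : List (List Int)) (r c : Nat) (x : Nat × Nat) :
    x ∈ pvVisited matrix r c ↔
    x.1 < r ∧ x.2 < c ∧ pvGet matrix x.1 x.2 ≠ 0 ∧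
      (pvRowZ matrix c x.1 ∨ pvColZ matrix r x.2) := by
  unfold pvVisited
  rw [pv_mem_foldl_union
      (fun i v => (List.range c).foldl
        (fun v j => if pvGet matrix i j = 0 then pvDfs matrix r c i j v else v) v)
      (fun i x => ∃ j ∈ List.range c, pvGet matrix i j = 0 ∧
        ((∃ k < c, x = (i, k) ∧ pvGet matrix i k ≠ 0) ∨
         (∃ k < r, x = (k, j) ∧ pvGet matrix k j ≠ 0)))
      (fun i v x => by
        rw [pv_mem_foldl_union
          (fun j v => if pvGet matrix i j = 0 then pvDfs matrix r c i j v else v)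
          (fun j x => pvGet matrix i j = 0 ∧
            ((∃ k < c, x = (i, k) ∧ pvGet matrix i k ≠ 0) ∨
             (∃ k < r, x = (k, j) ∧ pvGet matrix k j ≠ 0)))
          (fun j v x => by
            by_cases h0 : pvGet matrix i j = 0
            · simp only [h0, if_true, pv_mem_dfs, true_and]
            · simp [h0])])]
  simp only [List.mem_range, PySem.Set.empty, List.not_mem_nil, false_or]
  obtain ⟨a, b⟩ := x
  simp only [Prod.mk.injEq]
  constructor
  · rintro ⟨i, hi, j, hj, h0, ⟨k, hk, ⟨rfl, rfl⟩, hnz⟩ | ⟨k, hk, ⟨rfl, rfl⟩, hnz⟩⟩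
    · exact ⟨hi, hk, hnz, Or.inl ⟨j, hj, h0⟩⟩
    · exact ⟨hk, hj, hnz, Or.inr ⟨i, hi, h0⟩⟩
  · rintro ⟨ha, hb, hnz, ⟨j, hj, h0⟩ | ⟨i, hi, h0⟩⟩
    · exact ⟨a, ha, j, hj, h0, Or.inl ⟨b, hb, ⟨rfl, rfl⟩, hnz⟩⟩
    · exact ⟨i, hi, b, hb, h0, Or.inr ⟨a, ha, ⟨rfl, rfl⟩, hnz⟩⟩

theorem pv_set_getD_self {α : Type} (ys : List α) (j : Nat) (d : α) :
    ys.set j (ys.getD j d) = ys := by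
  by_cases hj : j < ys.length
  · rw [List.getD_eq_getElem ys d hj, List.set_getElem_self]
  · exact List.set_eq_of_length_le (Nat.le_of_not_lt hj)

-- the inner write loop over row i commutes into a single row update
theorem pv_inner_commute (P : Nat → Prop) [DecidablePred P] :
    ∀ (l : List Nat) (m : List (List Int)) (i : Nat),
      l.foldl (fun m j => if P j then m.set i ((m.getD i []).set j 0) else m) m
        = m.set i (l.foldl (fun row j => if P j then row.set j 0 else row) (m.getD i [])) := by
  intro l
  induction l with
  | nil =>
    intro m i
    simpa using (pv_set_getD_self m i []).symm
  | cons j l ih =>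
    intro m i
    by_cases hP : P j
    · simp only [List.foldl_cons, hP, if_true, ih]
      by_cases hi : i < m.length
      · rw [List.getD_eq_getElem _ _ hi, List.getD_eq_getElem _ _ (by simpa using hi),
            List.getElem_set_self, List.set_set]
      · have h1 : m.set i ((m.getD i []).set j 0) = m :=
          List.set_eq_of_length_le (Nat.le_of_not_lt hi)
        rw [h1]
        have h2 : m.getD i [] = ([] : List Int) :=
          List.getD_eq_default _ _ (Nat.le_of_not_lt hi)
        rw [h2]
        simp
    · simp only [List.foldl_cons, hP, if_false, ih]

-- a fold of in-place writes over range n is a mapIdx on the prefix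
theorem pv_foldl_range_set {α : Type} (f : Nat → α → α) (d : α) :
    ∀ (n : Nat) (xs : List α), n ≤ xs.length →
      (List.range n).foldl (fun ys j => ys.set j (f j (ys.getD j d))) xs
        = (xs.take n).mapIdx (fun j x => f j x) ++ xs.drop n := by
  intro n
  induction n with
  | zero => intro xs _; simp
  | succ n ih =>
    intro xs hn
    have hn' : n < xs.length := hn
    rw [List.range_succ, List.foldl_append, ih xs (Nat.le_of_lt hn')]
    simp only [List.foldl_cons, List.foldl_nil]
    have hlen : ((xs.take n).mapIdx (fun j x => f j x)).length = n := by
      simp [List.length_take, Nat.min_eq_left (Nat.le_of_lt hn')]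
    have hdrop : xs.drop n = xs[n] :: xs.drop (n + 1) := List.drop_eq_getElem_cons hn'
    have hget : (((xs.take n).mapIdx (fun j x => f j x)) ++ xs.drop n).getD n d = xs[n] := by
      rw [List.getD_eq_getElem?_getD, List.getElem?_append_right (by omega), hlen,
          Nat.sub_self, hdrop]
      simp [List.getElem?_eq_getElem hn']
    rw [hget]
    have htake : xs.take (n + 1) = xs.take n ++ [xs[n]] := by
      rw [List.take_add_one]
      simp [List.getElem?_eq_getElem hn']
    rw [List.set_append_right _ _ (by omega), hlen, Nat.sub_self, hdrop,
        List.set_cons_zero, htake, List.mapIdx_append]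
    simp [List.length_take, Nat.min_eq_left (Nat.le_of_lt hn')]

-- B's first pass, inner loop over row i
theorem pv_flags_inner (matrix : List (List Int)) (i : Nat) :
    ∀ (l : List Nat) (p : PySem.Set Nat × PySem.Set Nat),
      (∀ x, x ∈ (l.foldl (fun p j => if pvGet matrix i j = 0
            then (PySem.Set.add p.1 i, PySem.Set.add p.2 j) else p) p).1 ↔
        x ∈ p.1 ∨ (x = i ∧ ∃ j ∈ l, pvGet matrix i j = 0)) ∧
      (∀ x, x ∈ (l.foldl (fun p j => if pvGet matrix i j = 0
            then (PySem.Set.add p.1 i, PySem.Set.add p.2 j) else p) p).2 ↔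
        x ∈ p.2 ∨ ∃ j ∈ l, pvGet matrix i j = 0 ∧ x = j) := by
  intro l
  induction l with
  | nil => intro p; simp
  | cons a l ih =>
    intro p
    simp only [List.foldl_cons]
    by_cases h0 : pvGet matrix i a = 0
    · rw [if_pos h0]
      obtain ⟨ih1, ih2⟩ := ih (PySem.Set.add p.1 i, PySem.Set.add p.2 a)
      constructor
      · intro x
        rw [ih1]
        simp only [PySem.Set.mem_add, List.mem_cons]
        constructor
        · rintro ((h | hxi) | ⟨hxi, b, hb, hb0⟩)
          · tauto
          · exact Or.inr ⟨hxi, a, Or.inl rfl, h0⟩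
          · exact Or.inr ⟨hxi, b, Or.inr hb, hb0⟩
        · rintro (h | ⟨hxi, b, hb | hb, hb0⟩)
          · tauto
          · exact Or.inl (Or.inr hxi)
          · exact Or.inr ⟨hxi, b, hb, hb0⟩
      · intro x
        rw [ih2]
        simp only [PySem.Set.mem_add, List.mem_cons]
        constructor
        · rintro ((h | hxa) | ⟨b, hb, hb0, hxb⟩)
          · tauto
          · exact Or.inr ⟨a, Or.inl rfl, h0, hxa⟩
          · exact Or.inr ⟨b, Or.inr hb, hb0, hxb⟩
        · rintro (h | ⟨b, hb | hb, hb0, hxb⟩)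
          · tauto
          · exact Or.inl (Or.inr (hb ▸ hxb))
          · exact Or.inr ⟨b, hb, hb0, hxb⟩
    · rw [if_neg h0]
      obtain ⟨ih1, ih2⟩ := ih p
      constructor
      · intro x
        rw [ih1]
        simp only [List.mem_cons]
        constructor
        · rintro (h | ⟨hxi, b, hb, hb0⟩)
          · tauto
          · exact Or.inr ⟨hxi, b, Or.inr hb, hb0⟩
        · rintro (h | ⟨hxi, b, hb | hb, hb0⟩)
          · tauto
          · exact absurd (hb ▸ hb0) h0
          · exact Or.inr ⟨hxi, b, hb, hb0⟩
      · intro x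
        rw [ih2]
        simp only [List.mem_cons]
        constructor
        · rintro (h | ⟨b, hb, hb0, hxb⟩)
          · tauto
          · exact Or.inr ⟨b, Or.inr hb, hb0, hxb⟩
        · rintro (h | ⟨b, hb | hb, hb0, hxb⟩)
          · tauto
          · exact absurd (hb ▸ hb0) h0
          · exact Or.inr ⟨b, hb, hb0, hxb⟩

-- B's flag sets: a row index is flagged iff its row has a zero; a column index iff its column has one
theorem pv_flags_mem (matrix : List (List Int)) (r c : Nat) :
    (∀ x, x ∈ (pvFlags matrix r c).1 ↔ x < r ∧ pvRowZ matrix c x) ∧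
    (∀ x, x ∈ (pvFlags matrix r c).2 ↔ x < c ∧ pvColZ matrix r x) := by
  unfold pvFlags
  have main : ∀ (l : List Nat) (p : PySem.Set Nat × PySem.Set Nat),
      (∀ x, x ∈ (l.foldl (fun p i => (List.range c).foldl (fun p j => if pvGet matrix i j = 0
            then (PySem.Set.add p.1 i, PySem.Set.add p.2 j) else p) p) p).1 ↔
        x ∈ p.1 ∨ ∃ i ∈ l, x = i ∧ ∃ j ∈ List.range c, pvGet matrix i j = 0) ∧
      (∀ x, x ∈ (l.foldl (fun p i => (List.range c).foldl (fun p j => if pvGet matrix i j = 0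
            then (PySem.Set.add p.1 i, PySem.Set.add p.2 j) else p) p) p).2 ↔
        x ∈ p.2 ∨ ∃ i ∈ l, ∃ j ∈ List.range c, pvGet matrix i j = 0 ∧ x = j) := by
    intro l
    induction l with
    | nil => intro p; simp
    | cons a l ih =>
      intro p
      simp only [List.foldl_cons]
      obtain ⟨in1, in2⟩ := pv_flags_inner matrix a (List.range c) p
      obtain ⟨ih1, ih2⟩ := ih ((List.range c).foldl (fun p j => if pvGet matrix a j = 0
        then (PySem.Set.add p.1 a, PySem.Set.add p.2 j) else p) p)
      constructor
      · intro x
        rw [ih1, in1]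
        simp only [List.mem_cons]
        constructor
        · rintro ((h | ⟨hxa, h⟩) | ⟨b, hb, hxb, h⟩)
          · tauto
          · exact Or.inr ⟨a, Or.inl rfl, hxa, h⟩
          · exact Or.inr ⟨b, Or.inr hb, hxb, h⟩
        · rintro (h | ⟨b, hb | hb, hxb, h⟩)
          · tauto
          · exact Or.inl (Or.inr ⟨hb ▸ hxb, hb ▸ h⟩)
          · exact Or.inr ⟨b, hb, hxb, h⟩
      · intro x
        rw [ih2, in2]
        simp only [List.mem_cons]
        constructor
        · rintro ((h | h) | ⟨b, hb, h⟩)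
          · tauto
          · exact Or.inr ⟨a, Or.inl rfl, h⟩
          · exact Or.inr ⟨b, Or.inr hb, h⟩
        · rintro (h | ⟨b, hb | hb, h⟩)
          · tauto
          · subst hb; exact Or.inl (Or.inr h)
          · exact Or.inr ⟨b, hb, h⟩
  obtain ⟨h1, h2⟩ := main (List.range r) (PySem.Set.empty, PySem.Set.empty)
  constructor
  · intro x
    rw [h1]
    simp only [PySem.Set.empty, List.not_mem_nil, false_or, List.mem_range]
    unfold pvRowZ
    constructor
    · rintro ⟨i, hi, rfl, j, hj, h0⟩
      exact ⟨hi, j, hj, h0⟩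
    · rintro ⟨hx, j, hj, h0⟩
      exact ⟨x, hx, rfl, j, hj, h0⟩
  · intro x
    rw [h2]
    simp only [PySem.Set.empty, List.not_mem_nil, false_or, List.mem_range]
    unfold pvColZ
    constructor
    · rintro ⟨i, hi, j, hj, h0, rfl⟩
      exact ⟨hj, i, hi, h0⟩
    · rintro ⟨hx, i, hi, h0⟩
      exact ⟨i, hi, x, hx, h0, rfl⟩

-- the common second pass, normalised: prefix cells rewritten pointwise, the tail untouched
theorem pv_phase2_normal (P : Nat → Nat → Prop) [inst : ∀ i j, Decidable (P i j)]
    (c : Nat) (matrix : List (List Int)) (hlen : ∀ row ∈ matrix, c ≤ row.length) :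
    (List.range matrix.length).foldl
      (fun m i => (List.range c).foldl
        (fun m j => if P i j then m.set i ((m.getD i []).set j 0) else m) m) matrix
    = matrix.mapIdx (fun i row =>
        (row.take c).mapIdx (fun j x => if P i j then 0 else x) ++ row.drop c) := by
  have hcomm : (fun (m : List (List Int)) (i : Nat) => (List.range c).foldl
        (fun m j => if P i j then m.set i ((m.getD i []).set j 0) else m) m)
      = fun m i => m.set i ((List.range c).foldl
          (fun row j => if P i j then row.set j 0 else row) (m.getD i [])) := by
    funext m i
    exact pv_inner_commute (fun j => P i j) (List.range c) m i
  rw [hcomm,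
      pv_foldl_range_set
        (fun i row => (List.range c).foldl (fun row j => if P i j then row.set j 0 else row) row)
        ([] : List Int) matrix.length matrix le_rfl,
      List.take_length, List.drop_length, List.append_nil]
  refine List.ext_getElem (by simp) ?_
  intro i hi1 hi2
  have hi : i < matrix.length := by simpa using hi1
  simp only [List.getElem_mapIdx]
  have hc : c ≤ (matrix[i]'hi).length := hlen _ (List.getElem_mem hi)
  have hstep : (fun (row : List Int) (j : Nat) => if P i j then row.set j 0 else row)
      = fun row j => row.set j ((fun j x => if P i j then 0 else x) j (row.getD j 0)) := by
    funext row j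
    by_cases h : P i j
    · simp only [h, if_true]
    · simp only [h, if_false, pv_set_getD_self]
  rw [hstep, pv_foldl_range_set (fun j x => if P i j then 0 else x) 0 c (matrix[i]'hi) hc]

theorem pv_main : ∀ (matrix : List (List Int)), Pre_setZeroes matrix →
    setZeroes matrix = setZeroes_alt matrix := by
  intro matrix hpre
  obtain ⟨hne, hlong⟩ := hpre
  simp only [setZeroes, setZeroes_alt]
  set c := (matrix.headD []).length with hc
  set V := pvVisited matrix matrix.length c with hV
  set zz := pvFlags matrix matrix.length c with hzz
  rw [pv_phase2_normal (fun i j => (i, j) ∈ V) c matrix hlong,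
      pv_phase2_normal (fun i j => i ∈ zz.1 ∨ j ∈ zz.2) c matrix hlong]
  refine List.ext_getElem (by simp) ?_
  intro i hi1 hi2
  have hi : i < matrix.length := by simpa using hi1
  simp only [List.getElem_mapIdx]
  congr 1
  refine List.ext_getElem (by simp) ?_
  intro j hj1 hj2
  have hc' : c ≤ (matrix[i]'hi).length := hlong _ (List.getElem_mem hi)
  have hjc : j < c := by
    simp only [List.length_mapIdx, List.length_take, Nat.lt_min] at hj1
    exact hj1.1
  have hjr : j < (matrix[i]'hi).length := Nat.lt_of_lt_of_le hjc hc'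
  simp only [List.getElem_mapIdx, List.getElem_take]
  have hVm := pv_mem_visited matrix matrix.length c (i, j)
  obtain ⟨hf1, hf2⟩ := pv_flags_mem matrix matrix.length c
  have hgetij : pvGet matrix i j = (matrix[i]'hi)[j]'hjr := by
    unfold pvGet
    rw [List.getD_eq_getElem _ _ hi, List.getD_eq_getElem _ _ hjr]
  by_cases hb : pvRowZ matrix c i ∨ pvColZ matrix matrix.length j
  · have hBpos : i ∈ zz.1 ∨ j ∈ zz.2 := by
      rcases hb with h | h
      · exact Or.inl ((hf1 i).mpr ⟨hi, h⟩)
      · exact Or.inr ((hf2 j).mpr ⟨hjc, h⟩)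
    rw [if_pos hBpos]
    by_cases hnz : pvGet matrix i j = 0
    · rw [if_neg (show ¬ (i, j) ∈ V from fun hmV => (hVm.mp hmV).2.2.1 hnz)]
      rw [← hgetij]
      exact hnz
    · rw [if_pos (show (i, j) ∈ V from hVm.mpr ⟨hi, hjc, hnz, hb⟩)]
  · have hBneg : ¬ (i ∈ zz.1 ∨ j ∈ zz.2) := by
      rintro (h | h)
      · exact hb (Or.inl ((hf1 i).mp h).2)
      · exact hb (Or.inr ((hf2 j).mp h).2)
    rw [if_neg hBneg,
        if_neg (show ¬ (i, j) ∈ V from fun hmV => hb (hVm.mp hmV).2.2.2)]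

-- ===== VERDICT (by name: the statement is the Claim_ definition above) =====
theorem setZeroes_spec : Claim_equal_setZeroes := by
  intro matrix _ hpre
  unfold Spec_setZeroes
  exact pv_main matrix hpre
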